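-- pv_equiv track=rewrite | github.com/Anamicca23/Leetcode-for-DSA | 2081-sum-of-k-mirror-numbers/2081-sum-of-k-mirror-numbers.py | createPalindrome
-- ===== SOURCE A (Python) =====
-- def createPalindrome(num: int, odd: bool) -> int:
--     x = num
--     if odd:
--         x //= 10
--     while x > 0:
--         num = num * 10 + x % 10
--         x //= 10
--     return num
-- ===== SOURCE B (Python) =====
-- def _rp(x):
--     # returns (value of x's decimal digits reversed, 10 ** number_of_digits(x));
--     # for x <= 0 there are no digits to mirror: (0, 1)
--     if x <= 0:
--         return (0, 1)
--     r, p = _rp(x // 10)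
--     return (x % 10 * p + r, 10 * p)
--
--
-- def createPalindrome(num: int, odd: bool) -> int:
--     x = num // 10 if odd else num
--     r, p = _rp(x)
--     return num * p + r
-- ===== Notes on version B (the rewrite author's own statement) =====
-- stated objective: alternative
-- what changed: Replaces A's in-place accumulator while-loop (num = num*10 + x%10 per step) by a recursive helper returning the pair (reversed-digit value, 10**digit_count), combined with a single num*p + r at the end.
import Mathlib
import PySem

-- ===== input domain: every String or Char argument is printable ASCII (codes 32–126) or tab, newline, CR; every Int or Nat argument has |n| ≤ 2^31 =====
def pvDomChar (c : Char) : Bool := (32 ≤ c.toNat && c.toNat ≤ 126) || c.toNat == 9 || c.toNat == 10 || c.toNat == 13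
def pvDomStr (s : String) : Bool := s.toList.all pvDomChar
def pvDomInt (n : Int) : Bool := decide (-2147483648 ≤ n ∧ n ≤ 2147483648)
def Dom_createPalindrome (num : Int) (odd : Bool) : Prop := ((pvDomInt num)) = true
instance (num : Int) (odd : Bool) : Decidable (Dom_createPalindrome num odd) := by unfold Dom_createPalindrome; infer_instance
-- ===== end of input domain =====

-- ===== PORT A =====
-- B replaces A's accumulator while-loop by a recursive helper returning (reversed digits, 10^digits); alternative decomposition, same cost.

-- while x > 0: num = num * 10 + x % 10; x //= 10   (A's loop, transliterated)
def createPalindromeLoop (num : Int) (x : Int) : Int :=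
  if 0 < x then
    createPalindromeLoop (num * 10 + PySem.Int.mod x 10) (PySem.Int.floordiv x 10)
  else num
termination_by x.toNat
decreasing_by
  rename_i h
  rw [PySem.Int.floordiv_eq_ediv_of_pos (by omega)]
  omega

def createPalindrome (num : Int) (odd : Bool) : Int :=
  let x := num
  let x := if odd then PySem.Int.floordiv x 10 else x
  createPalindromeLoop num x

-- ===== PORT B =====
-- _rp(x): (value of x's decimal digits reversed, 10 ** number_of_digits(x)); (0, 1) for x <= 0
def rpB (x : Int) : Int × Int :=
  if 0 < x then
    let rq := rpB (PySem.Int.floordiv x 10)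
    (PySem.Int.mod x 10 * rq.2 + rq.1, 10 * rq.2)
  else (0, 1)
termination_by x.toNat
decreasing_by
  rename_i h
  rw [PySem.Int.floordiv_eq_ediv_of_pos (by omega)]
  omega

def createPalindrome_alt (num : Int) (odd : Bool) : Int :=
  let x := if odd then PySem.Int.floordiv num 10 else num
  let rp := rpB x
  num * rp.2 + rp.1

-- ===== PRECONDITION & SPEC =====
def Spec_createPalindrome (num : Int) (odd : Bool) (out : Int) : Prop := out = createPalindrome_alt num odd
instance (num : Int) (odd : Bool) (out : Int) : Decidable (Spec_createPalindrome num odd out) := by unfold Spec_createPalindrome; infer_instance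

-- ===== CLAIM (what is proved, stated in full; the proofs are below) =====
def Claim_equal_createPalindrome : Prop := ∀ (num : Int) (odd : Bool), Dom_createPalindrome num odd → Spec_createPalindrome num odd (createPalindrome num odd)

-- ===== LEMMAS AND PROOFS =====
theorem createPalindromeLoop_eq_rpB (x : Int) : ∀ num : Int,
    createPalindromeLoop num x = num * (rpB x).2 + (rpB x).1 := by
  intro num
  by_cases h : 0 < x
  · have ih := createPalindromeLoop_eq_rpB (PySem.Int.floordiv x 10)
      (num * 10 + PySem.Int.mod x 10)
    rw [createPalindromeLoop, rpB]
    simp only [h, if_pos]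
    rw [ih]
    ring
  · rw [createPalindromeLoop, rpB]
    simp [h]
termination_by x.toNat
decreasing_by
  rw [PySem.Int.floordiv_eq_ediv_of_pos (by omega)]
  omega

-- ===== VERDICT (by name: the statement is the Claim_ definition above) =====
theorem createPalindrome_spec : Claim_equal_createPalindrome := by
  intro num odd _
  unfold Spec_createPalindrome createPalindrome createPalindrome_alt
  cases odd <;> simp [createPalindromeLoop_eq_rpB]
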